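-- pv_equiv track=rewrite | github.com/Bubobot-Team/mcp-prompt-optimizer | prompt_optimizer.py | _add_role_context
-- ===== SOURCE A (Python) =====
-- def _add_role_context(prompt: str) -> str:
--     """Add role-based expertise context"""
--     # Detect domain based on keywords, prioritizing more specific roles
--     role = "expert"
--     if any(word in prompt.lower() for word in ["code", "program", "software", "debug", "api"]):
--         role = "senior software engineer and architect"
--     elif any(word in prompt.lower() for word in ["business", "strategy", "market", "finance", "investment"]):
--         role = "seasoned business strategist and financial analyst"
--     elif any(word in prompt.lower() for word in ["write", "content", "article", "story", "blog"]):
--         role = "professional writer and content creator"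
--     elif any(word in prompt.lower() for word in ["data", "analyze", "statistics", "insights"]):
--         role = "expert data scientist and analyst"
--     elif any(word in prompt.lower() for word in ["design", "ui", "ux", "user experience"]):
--         role = "experienced UX/UI designer"
--     elif any(word in prompt.lower() for word in ["legal", "contract", "compliance"]):
--         role = "legal counsel specializing in contract law"
--     elif any(word in prompt.lower() for word in ["project management", "agile", "scrum"]):
--         role = "certified project manager"
--
--     role_prompt = f"As a {role}, {prompt}"
--     role_prompt += f"\n\nDraw upon your extensive expertise to provide insights that only a {role} would know, ensuring accuracy and depth."
--
--     return role_prompt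
-- ===== SOURCE B (Python) =====
-- # B: flat keyword->(priority, role) map; role = minimum-priority matching keyword
-- # computed by one min() over the whole map (no ordered group scan / break).
-- _GROUPS = [
--     ("senior software engineer and architect", ["code", "program", "software", "debug", "api"]),
--     ("seasoned business strategist and financial analyst", ["business", "strategy", "market", "finance", "investment"]),
--     ("professional writer and content creator", ["write", "content", "article", "story", "blog"]),
--     ("expert data scientist and analyst", ["data", "analyze", "statistics", "insights"]),
--     ("experienced UX/UI designer", ["design", "ui", "ux", "user experience"]),
--     ("legal counsel specializing in contract law", ["legal", "contract", "compliance"]),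
--     ("certified project manager", ["project management", "agile", "scrum"]),
-- ]
-- _KEYWORD_ROLES = {kw: (prio, role) for prio, (role, kws) in enumerate(_GROUPS) for kw in kws}
--
-- def _add_role_context(prompt: str) -> str:
--     low = prompt.lower()
--     _, role = min(
--         (pr for kw, pr in _KEYWORD_ROLES.items() if kw in low),
--         default=(len(_GROUPS), "expert"),
--     )
--     return (f"As a {role}, {prompt}"
--             f"\n\nDraw upon your extensive expertise to provide insights that only a {role} would know, ensuring accuracy and depth.")
-- ===== Notes on version B (the rewrite author's own statement) =====
-- stated objective: alternative
-- what changed: Replaces the ordered if/elif first-match scan over role groups by a flat keyword->(priority, role) dictionary and computes the role as the minimum-priority keyword that occurs in the lowercased prompt via a single min() with a default, instead of branch-by-branch short-circuiting.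
import Mathlib
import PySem

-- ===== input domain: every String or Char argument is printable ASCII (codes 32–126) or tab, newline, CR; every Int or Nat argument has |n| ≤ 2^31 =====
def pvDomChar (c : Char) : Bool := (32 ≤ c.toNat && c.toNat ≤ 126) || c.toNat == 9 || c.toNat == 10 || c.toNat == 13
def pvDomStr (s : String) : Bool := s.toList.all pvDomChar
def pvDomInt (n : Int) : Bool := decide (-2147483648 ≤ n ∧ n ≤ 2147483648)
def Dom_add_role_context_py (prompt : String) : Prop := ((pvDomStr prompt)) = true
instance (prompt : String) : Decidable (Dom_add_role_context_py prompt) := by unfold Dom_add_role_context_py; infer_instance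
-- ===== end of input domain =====

-- B replaces A's if/elif first-match chain by a flat keyword->(priority, role) map and a
-- min-priority-match computation (objective: alternative; same output).

-- ===== PORT A =====
-- 'any(word in prompt.lower() for word in kws)'
def pvAnyKw (kws : List String) (prompt : String) : Bool :=
  kws.any (fun w => PySem.Str.isIn w (PySem.Str.lower prompt))

def add_role_context_py (prompt : String) : String :=
  let role : String :=
    if pvAnyKw ["code", "program", "software", "debug", "api"] prompt then
      "senior software engineer and architect"
    else if pvAnyKw ["business", "strategy", "market", "finance", "investment"] prompt then
      "seasoned business strategist and financial analyst"
    else if pvAnyKw ["write", "content", "article", "story", "blog"] prompt then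
      "professional writer and content creator"
    else if pvAnyKw ["data", "analyze", "statistics", "insights"] prompt then
      "expert data scientist and analyst"
    else if pvAnyKw ["design", "ui", "ux", "user experience"] prompt then
      "experienced UX/UI designer"
    else if pvAnyKw ["legal", "contract", "compliance"] prompt then
      "legal counsel specializing in contract law"
    else if pvAnyKw ["project management", "agile", "scrum"] prompt then
      "certified project manager"
    else "expert"
  PySem.Str.join "" ["As a ", role, ", ", prompt,
    "\n\nDraw upon your extensive expertise to provide insights that only a ", role,
    " would know, ensuring accuracy and depth."]

-- ===== PORT B =====
-- the flat dict _KEYWORD_ROLES in insertion order: keyword -> (priority, role)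
def pvKeywordRoles : List (String × Int × String) :=
  (["code", "program", "software", "debug", "api"].map (fun k => (k, ((0 : Int), "senior software engineer and architect")))) ++
  (["business", "strategy", "market", "finance", "investment"].map (fun k => (k, ((1 : Int), "seasoned business strategist and financial analyst")))) ++
  (["write", "content", "article", "story", "blog"].map (fun k => (k, ((2 : Int), "professional writer and content creator")))) ++
  (["data", "analyze", "statistics", "insights"].map (fun k => (k, ((3 : Int), "expert data scientist and analyst")))) ++
  (["design", "ui", "ux", "user experience"].map (fun k => (k, ((4 : Int), "experienced UX/UI designer")))) ++
  (["legal", "contract", "compliance"].map (fun k => (k, ((5 : Int), "legal counsel specializing in contract law")))) ++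
  (["project management", "agile", "scrum"].map (fun k => (k, ((6 : Int), "certified project manager"))))

-- Python's '<' on (int, str) tuples (lexicographic; strict)
def pvTupLt (a b : Int × String) : Bool :=
  decide (a.1 < b.1) || (a.1 == b.1 && decide (a.2 < b.2))

-- one min() step: keep b unless c is strictly smaller (min returns the FIRST minimum)
def pvMinStep (b c : Int × String) : Int × String := if pvTupLt c b then c else b

-- Python 'min(l, default=d)': d if l is empty, else first minimum of l
def pvMinD (d : Int × String) : List (Int × String) → Int × String
  | [] => d
  | x :: xs => xs.foldl pvMinStep x

def add_role_context_py_alt (prompt : String) : String :=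
  let low := PySem.Str.lower prompt
  -- '(pr for kw, pr in _KEYWORD_ROLES.items() if kw in low)'
  let cands := pvKeywordRoles.filterMap (fun kp => if PySem.Str.isIn kp.1 low then some kp.2 else none)
  let role := (pvMinD (7, "expert") cands).2
  PySem.Str.join "" ["As a ", role, ", ", prompt,
    "\n\nDraw upon your extensive expertise to provide insights that only a ", role,
    " would know, ensuring accuracy and depth."]

-- ===== PRECONDITION & SPEC =====
def Spec_add_role_context_py (prompt : String) (out : String) : Prop := out = add_role_context_py_alt prompt
instance (prompt : String) (out : String) : Decidable (Spec_add_role_context_py prompt out) := by unfold Spec_add_role_context_py; infer_instance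

-- ===== CLAIM (what is proved, stated in full; the proofs are below) =====
def Claim_equal_add_role_context_py : Prop := ∀ (prompt : String), Dom_add_role_context_py prompt → Spec_add_role_context_py prompt (add_role_context_py prompt)

-- ===== LEMMAS AND PROOFS =====

-- A's role chain, as a function of the lowercased prompt (proof helper)
def pvChainRole (low : String) : String :=
  if (["code", "program", "software", "debug", "api"].any fun w => PySem.Str.isIn w low) = true then
    "senior software engineer and architect"
  else if (["business", "strategy", "market", "finance", "investment"].any fun w => PySem.Str.isIn w low) = true then
    "seasoned business strategist and financial analyst"
  else if (["write", "content", "article", "story", "blog"].any fun w => PySem.Str.isIn w low) = true then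
    "professional writer and content creator"
  else if (["data", "analyze", "statistics", "insights"].any fun w => PySem.Str.isIn w low) = true then
    "expert data scientist and analyst"
  else if (["design", "ui", "ux", "user experience"].any fun w => PySem.Str.isIn w low) = true then
    "experienced UX/UI designer"
  else if (["legal", "contract", "compliance"].any fun w => PySem.Str.isIn w low) = true then
    "legal counsel specializing in contract law"
  else if (["project management", "agile", "scrum"].any fun w => PySem.Str.isIn w low) = true then
    "certified project manager"
  else "expert"

-- a second min step with the same candidate changes nothing
theorem pvMinStep_idem (b e : Int × String) : pvMinStep (pvMinStep b e) e = pvMinStep b e := by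
  unfold pvMinStep
  by_cases h : pvTupLt e b = true <;> simp [h]

-- min-with-default from d equals a plain fold from d when every element beats d
theorem pvMinD_eq_foldl (d : Int × String) (l : List (Int × String))
    (h : ∀ c ∈ l, pvTupLt c d = true) :
    pvMinD d l = l.foldl pvMinStep d := by
  cases l with
  | nil => rfl
  | cons x xs =>
      simp [pvMinD, List.foldl, pvMinStep, h x (by simp)]

-- folding the candidates of one keyword group (all carrying the same (priority, role) e)
-- is one conditional min step, guarded by "some keyword of the group matches"
theorem pvGroupStep (p : String → Bool) (kws : List String) (e : Int × String) (b : Int × String) :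
    List.foldl pvMinStep b
      (kws.filterMap (fun k => if p k = true then some e else none))
    = if (kws.any p) = true then pvMinStep b e else b := by
  induction kws generalizing b with
  | nil => rfl
  | cons k ks ih =>
      by_cases hk : p k = true <;>
        by_cases hks : (ks.any p) = true <;>
          simp [hk, hks, ih, pvMinStep_idem]

-- the min-priority matching keyword yields exactly the chain's role
theorem pvRoleEq (low : String) :
    (pvMinD (7, "expert") (pvKeywordRoles.filterMap
      (fun kp => if PySem.Str.isIn kp.1 low = true then some kp.2 else none))).2
    = pvChainRole low := by
  have hall : ∀ c ∈ pvKeywordRoles.filterMap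
      (fun kp => if PySem.Str.isIn kp.1 low = true then some kp.2 else none),
      pvTupLt c (7, "expert") = true := by
    intro c hc
    obtain ⟨a, ha, hfa⟩ := List.mem_filterMap.1 hc
    have hc2 : c = a.2 := by
      by_cases h : PySem.Str.isIn a.1 low = true
      · rw [if_pos h] at hfa; exact (Option.some.inj hfa).symm
      · rw [if_neg h] at hfa; cases hfa
    subst hc2
    fin_cases ha <;> rfl
  rw [pvMinD_eq_foldl _ _ hall]
  unfold pvChainRole
  simp only [pvKeywordRoles, List.filterMap_append, List.filterMap_map, Function.comp_def,
    List.foldl_append, pvGroupStep]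
  generalize (["code", "program", "software", "debug", "api"].any fun w => PySem.Str.isIn w low) = g0
  generalize (["business", "strategy", "market", "finance", "investment"].any fun w => PySem.Str.isIn w low) = g1
  generalize (["write", "content", "article", "story", "blog"].any fun w => PySem.Str.isIn w low) = g2
  generalize (["data", "analyze", "statistics", "insights"].any fun w => PySem.Str.isIn w low) = g3
  generalize (["design", "ui", "ux", "user experience"].any fun w => PySem.Str.isIn w low) = g4
  generalize (["legal", "contract", "compliance"].any fun w => PySem.Str.isIn w low) = g5
  generalize (["project management", "agile", "scrum"].any fun w => PySem.Str.isIn w low) = g6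
  cases g0 <;> cases g1 <;> cases g2 <;> cases g3 <;> cases g4 <;> cases g5 <;> cases g6 <;> rfl

-- ===== VERDICT (by name: the statement is the Claim_ definition above) =====
theorem add_role_context_py_spec : Claim_equal_add_role_context_py := by
  intro prompt _
  show add_role_context_py prompt = add_role_context_py_alt prompt
  simp only [add_role_context_py, add_role_context_py_alt, pvAnyKw, pvRoleEq, pvChainRole]
  rfl
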